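-- pv_equiv track=rewrite | github.com/radurevutchi/crosswords | crossword_comparison.py | pad_grid_to_size
-- ===== SOURCE A (Python) =====
-- def pad_grid_to_size(grid, size):
--     """Pad or trim grid to specified size."""
--     if not grid:
--         return [["#" for _ in range(size)] for _ in range(size)]
--
--     # Convert to list of lists if needed
--     if hasattr(grid, "tolist"):
--         grid = grid.tolist()
--
--     result = []
--     for i in range(size):
--         row = []
--         for j in range(size):
--             if i < len(grid) and j < len(grid[i]):
--                 cell = grid[i][j]
--                 if cell in [None, "", " ", ".", 0]:
--                     row.append("#")
--                 else:
--                     row.append(str(cell))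
--             else:
--                 row.append("#")
--         result.append(row)
--     return result
-- ===== SOURCE B (Python) =====
-- def pad_grid_to_size(grid, size):
--     """Pad or trim grid to specified size (truncate rows/cols, then pad with '#')."""
--     if not grid:
--         return [["#"] * size for _ in range(size)]
--
--     if hasattr(grid, "tolist"):
--         grid = grid.tolist()
--
--     n = max(size, 0)
--     result = []
--     for src in grid[:n]:
--         row = ["#" if cell in [None, "", " ", ".", 0] else str(cell) for cell in src[:n]]
--         row += ["#"] * (n - len(row))
--         result.append(row)
--     result += [["#"] * n] * (n - len(result))
--     return result
-- ===== Notes on version B (the rewrite author's own statement) =====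
-- stated objective: alternative
-- what changed: B replaces the size×size per-cell index loop with per-cell bounds checks by a truncate-then-pad decomposition: it normalizes each existing row of grid[:size], pads it to length size, and then appends whole '#' filler rows.
import Mathlib
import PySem

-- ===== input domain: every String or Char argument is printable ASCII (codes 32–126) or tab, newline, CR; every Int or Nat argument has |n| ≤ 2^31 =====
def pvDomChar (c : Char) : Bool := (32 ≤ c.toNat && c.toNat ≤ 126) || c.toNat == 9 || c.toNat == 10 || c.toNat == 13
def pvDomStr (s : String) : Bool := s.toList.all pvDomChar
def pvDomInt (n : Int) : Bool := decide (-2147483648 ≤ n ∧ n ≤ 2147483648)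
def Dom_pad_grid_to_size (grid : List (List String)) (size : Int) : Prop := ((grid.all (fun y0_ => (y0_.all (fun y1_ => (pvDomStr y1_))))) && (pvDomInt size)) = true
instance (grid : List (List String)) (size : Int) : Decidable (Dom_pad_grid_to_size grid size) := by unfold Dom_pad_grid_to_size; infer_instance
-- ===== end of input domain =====

-- B is an alternative decomposition (truncate rows/cols, normalize, then pad with '#'),
-- structurally different from A's per-cell bounds-checked index loop; same cost.

-- cell normalization shared by both ports: on String cells, Python's
-- `cell in [None, "", " ", ".", 0]` is exactly membership in {"", " ", "."}
-- (a str never equals None or 0), and `str(cell)` is the identity.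
def pvNorm (c : String) : String := if c = "" ∨ c = " " ∨ c = "." then "#" else c

-- ===== PORT A =====
def pad_grid_to_size (grid : List (List String)) (size : Int) : List (List String) :=
  if grid = [] then
    (PySem.List.pyRange 0 size 1).map (fun _ => (PySem.List.pyRange 0 size 1).map (fun _ => "#"))
  else
    -- the `tolist` guard is a no-op on a list of lists
    (PySem.List.pyRange 0 size 1).map (fun i =>
      (PySem.List.pyRange 0 size 1).map (fun j =>
        if i < (grid.length : Int) ∧ j < ((PySem.List.pyGetD grid i []).length : Int)
        then pvNorm (PySem.List.pyGetD (PySem.List.pyGetD grid i []) j "")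
        else "#"))

-- ===== PORT B =====
def pad_grid_to_size_alt (grid : List (List String)) (size : Int) : List (List String) :=
  if grid = [] then
    (PySem.List.pyRange 0 size 1).map (fun _ => (PySem.List.pyRange 0 size 1).map (fun _ => "#"))
  else
    let n := max size 0
    let rows := (PySem.List.slice grid none (some n)).map (fun src =>
      let row := (PySem.List.slice src none (some n)).map pvNorm
      row ++ List.replicate (n.toNat - row.length) "#")
    rows ++ List.replicate (n.toNat - rows.length) (List.replicate n.toNat "#")

-- ===== PRECONDITION & SPEC =====
def Spec_pad_grid_to_size (grid : List (List String)) (size : Int) (out : List (List String)) : Prop := out = pad_grid_to_size_alt grid size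
instance (grid : List (List String)) (size : Int) (out : List (List String)) : Decidable (Spec_pad_grid_to_size grid size out) := by unfold Spec_pad_grid_to_size; infer_instance

-- ===== CLAIM (what is proved, stated in full; the proofs are below) =====
def Claim_equal_pad_grid_to_size : Prop := ∀ (grid : List (List String)) (size : Int), Dom_pad_grid_to_size grid size → Spec_pad_grid_to_size grid size (pad_grid_to_size grid size)

-- ===== LEMMAS AND PROOFS =====

theorem pad_grid_to_size_eq (grid : List (List String)) (size : Int) :
    pad_grid_to_size grid size = pad_grid_to_size_alt grid size := by
  by_cases hg : grid = []
  · simp [pad_grid_to_size, pad_grid_to_size_alt, hg]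
  · have hn0 : (0:Int) ≤ max size 0 := le_max_right _ _
    have hns : (max size 0).toNat = size.toNat := by omega
    have hsl : ∀ {α : Type} (xs : List α),
        PySem.List.slice xs none (some (max size 0)) = xs.take size.toNat := by
      intro α xs
      rw [PySem.List.slice_to _ hn0, hns]
    simp only [pad_grid_to_size, pad_grid_to_size_alt, if_neg hg, hsl, hns]
    apply List.ext_getElem
    · simp [PySem.List.length_pyRange_one]
    · intro i h1 h2
      simp only [List.getElem_map, PySem.List.getElem_pyRange_one, zero_add]
      have hi : i < size.toNat := by
        simpa [PySem.List.length_pyRange_one] using h1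
      by_cases hgi : i < grid.length
      · rw [List.getElem_append_left (by simp; omega)]
        simp only [List.getElem_map, List.getElem_take]
        have hrow : PySem.List.pyGetD grid (↑i) [] = grid[i] := by
          rw [PySem.List.pyGetD_eq_getElem _ _ (by positivity) (by exact_mod_cast hgi)]
          simp
        apply List.ext_getElem
        · simp [PySem.List.length_pyRange_one]
        · intro j hj1 hj2
          have hj : j < size.toNat := by
            simpa [PySem.List.length_pyRange_one] using hj1
          simp only [List.getElem_map, PySem.List.getElem_pyRange_one, zero_add, hrow]
          by_cases hgj : j < grid[i].length
          · rw [List.getElem_append_left (by simp; omega)]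
            rw [if_pos ⟨by exact_mod_cast hgi, by exact_mod_cast hgj⟩]
            rw [PySem.List.pyGetD_eq_getElem _ _ (by positivity) (by exact_mod_cast hgj)]
            simp
          · rw [List.getElem_append_right (by simp; omega)]
            rw [if_neg (fun h => hgj (by exact_mod_cast h.2))]
            simp
      · rw [List.getElem_append_right (by simp; omega)]
        rw [List.getElem_replicate]
        apply List.ext_getElem
        · simp [PySem.List.length_pyRange_one]
        · intro j hj1 hj2
          simp only [List.getElem_map, PySem.List.getElem_pyRange_one, zero_add,
            List.getElem_replicate]
          rw [if_neg (fun h => hgi (by exact_mod_cast h.1))]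

-- ===== VERDICT (by name: the statement is the Claim_ definition above) =====
theorem pad_grid_to_size_spec : Claim_equal_pad_grid_to_size := by
  intro grid size _
  exact pad_grid_to_size_eq grid size
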